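-- pv_equiv track=rewrite | github.com/suhteevah/githubuploaderbuildout | upload_to_github.py | sanitize_repo_name
-- ===== SOURCE A (Python) =====
-- def sanitize_repo_name(name: str) -> str:
--     """
--     Sanitize a folder name to be a valid GitHub repo name.
--     GitHub repo names can contain alphanumerics, hyphens, underscores, and dots.
--     """
--     sanitized = ""
--     for char in name:
--         if char.isalnum() or char in "-_.":
--             sanitized += char
--         elif char in " /\\":
--             sanitized += "-"
--     # Remove leading/trailing hyphens/dots
--     sanitized = sanitized.strip("-.")
--     # Collapse multiple hyphens
--     while "--" in sanitized:
--         sanitized = sanitized.replace("--", "-")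
--     return sanitized or "unnamed-project"
-- ===== SOURCE B (Python) =====
-- def sanitize_repo_name(name: str) -> str:
--     """
--     Sanitize a folder name to be a valid GitHub repo name.
--     Single run-scanning pass emits each hyphen run as one hyphen, instead of
--     a fixpoint loop of global "--" -> "-" replacements.
--     """
--     mapped = []
--     for c in name:
--         if c.isalnum() or c in "-_.":
--             mapped.append(c)
--         elif c in " /\\":
--             mapped.append("-")
--     core = "".join(mapped).strip("-.")
--     out = []
--     i = 0
--     n = len(core)
--     while i < n:
--         j = i + 1
--         while j < n and core[j] == core[i]:
--             j += 1
--         out.append("-" if core[i] == "-" else core[i:j])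
--         i = j
--     return "".join(out) or "unnamed-project"
-- ===== Notes on version B (the rewrite author's own statement) =====
-- stated objective: alternative
-- what changed: B collapses hyphen runs in a single index-based run scan over the mapped string instead of A's fixpoint loop of repeated global '--'->'-' replacements (classification, strip('-.') and the fallback are unchanged).
import Mathlib
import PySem

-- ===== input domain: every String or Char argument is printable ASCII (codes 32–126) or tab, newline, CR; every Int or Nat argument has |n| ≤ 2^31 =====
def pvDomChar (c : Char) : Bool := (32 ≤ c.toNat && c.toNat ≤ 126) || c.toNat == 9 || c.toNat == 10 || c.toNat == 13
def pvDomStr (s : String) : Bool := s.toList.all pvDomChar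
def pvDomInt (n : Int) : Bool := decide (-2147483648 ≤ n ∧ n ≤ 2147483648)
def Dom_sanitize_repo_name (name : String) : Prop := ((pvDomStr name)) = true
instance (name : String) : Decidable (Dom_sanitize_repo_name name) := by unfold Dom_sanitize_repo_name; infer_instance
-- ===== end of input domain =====

-- B replaces A's fixpoint loop of global "--"→"-" replacements by a single run-scanning
-- pass (objective: alternative decomposition; same classification, strip and fallback).

-- ===== PORT A =====
-- pvRep is the left-to-right non-overlapping single pass of Python's s.replace("--","-");
-- it is only used to prove termination of A's `while "--" in sanitized` loop (collapseLoop
-- cites pvRep_length_lt by name in its decreasing_by) and in the proofs below the claim.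
def pvRep : List Char → List Char
  | [] => []
  | [c] => [c]
  | a :: b :: t => if a = '-' ∧ b = '-' then '-' :: pvRep t else a :: pvRep (b :: t)
termination_by l => l.length

theorem pvRep_length_le (l : List Char) : (pvRep l).length ≤ l.length := by
  induction l using pvRep.induct with
  | case1 => simp [pvRep]
  | case2 c => simp [pvRep]
  | case3 a b t h ih =>
      simp only [pvRep, if_pos h, List.length_cons]
      omega
  | case4 a b t h ih =>
      simp only [pvRep, if_neg h, List.length_cons]
      simpa using ih

theorem pvGo_eq_pvRep (fuel : Nat) : ∀ (l acc : List Char), l.length ≤ fuel →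
    PySem.Chars.replace.go ['-', '-'] ['-'] fuel l acc = acc.reverse ++ pvRep l := by
  induction fuel with
  | zero =>
      intro l acc h
      have : l = [] := by cases l <;> simp_all
      subst this
      simp [PySem.Chars.replace.go, pvRep]
  | succ fuel ih =>
      intro l acc h
      cases l with
      | nil => simp [PySem.Chars.replace.go, pvRep]
      | cons c t =>
        by_cases hp : ['-', '-'].isPrefixOf (c :: t) = true
        · cases t with
          | nil => simp [List.isPrefixOf] at hp
          | cons b t2 =>
            rw [List.isPrefixOf_iff_prefix, List.cons_prefix_cons] at hp
            obtain ⟨hc, hp2⟩ := hp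
            rw [List.cons_prefix_cons] at hp2
            obtain ⟨hb, -⟩ := hp2
            subst hc; subst hb
            have hpre : ['-', '-'].isPrefixOf ('-' :: '-' :: t2) = true := by
              rw [List.isPrefixOf_iff_prefix]
              simp [List.cons_prefix_cons]
            simp only [PySem.Chars.replace.go, hpre, if_pos]
            rw [show List.drop ['-', '-'].length ('-' :: '-' :: t2) = t2 by simp]
            rw [ih t2 (['-'].reverse ++ acc) (by simp at h ⊢; omega)]
            simp [pvRep]
        · simp only [PySem.Chars.replace.go, hp]
          rw [if_neg (by simp)]
          rw [ih t (c :: acc) (by simp at h ⊢; omega)]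
          cases t with
          | nil => simp [pvRep]
          | cons b t2 =>
            have hnot : ¬ (c = '-' ∧ b = '-') := by
              rintro ⟨rfl, rfl⟩
              rw [List.isPrefixOf_iff_prefix] at hp
              exact hp (by simp [List.cons_prefix_cons])
            simp [pvRep, if_neg hnot]

theorem pvReplace_eq_pvRep (s : List Char) :
    PySem.Chars.replace s ['-', '-'] ['-'] = pvRep s := by
  simp only [PySem.Chars.replace]
  rw [if_neg (by simp)]
  simpa using pvGo_eq_pvRep s.length s [] le_rfl

theorem pvRep_length_lt (l : List Char) (h : ['-', '-'] <:+: l) :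
    (pvRep l).length < l.length := by
  induction l using pvRep.induct with
  | case1 => simp at h
  | case2 c =>
      exfalso
      have := h.length_le
      simp at this
  | case3 a b t hdd ih =>
      simp only [pvRep, if_pos hdd, List.length_cons]
      have := pvRep_length_le t
      omega
  | case4 a b t hdd ih =>
      have h2 : ['-', '-'] <:+: b :: t := by
        rcases List.infix_cons_iff.mp h with hpre | htl
        · exfalso
          rw [List.cons_prefix_cons] at hpre
          rcases hpre with ⟨rfl, hpre⟩
          rw [List.cons_prefix_cons] at hpre
          exact hdd ⟨rfl, hpre.1.symm⟩
        · exact htl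
      simp only [pvRep, if_neg hdd, List.length_cons]
      exact Nat.succ_lt_succ (ih h2)

-- the `while "--" in sanitized: sanitized = sanitized.replace("--", "-")` loop of A
def collapseLoop (s : List Char) : List Char :=
  if h : PySem.Chars.isIn ['-', '-'] s = true then
    collapseLoop (PySem.Chars.replace s ['-', '-'] ['-'])
  else s
termination_by s.length
decreasing_by
  rw [pvReplace_eq_pvRep]
  exact pvRep_length_lt s ((PySem.Chars.isIn_iff_infix _ _).mp h)

def sanitize_repo_name (name : String) : String :=
  -- for char in name: … build `sanitized` by appending char / "-" / nothing
  let sanitized := name.toList.foldl (fun acc c =>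
    if PySem.Chars.isalnum c || PySem.Chars.isIn [c] ['-', '_', '.'] then acc ++ [c]
    else if PySem.Chars.isIn [c] [' ', '/', '\\'] then acc ++ ['-'] else acc) []
  -- sanitized.strip("-.")
  let stripped := PySem.Chars.stripChars sanitized ['-', '.']
  -- while "--" in sanitized: sanitized = sanitized.replace("--", "-")
  let collapsed := collapseLoop stripped
  -- return sanitized or "unnamed-project"
  if collapsed.isEmpty then "unnamed-project" else String.ofList collapsed

-- ===== PORT B =====
-- Source B's per-character classification (the "" case of the comprehension is `none`)
def pvClassify (c : Char) : Option Char :=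
  if PySem.Chars.isalnum c || PySem.Chars.isIn [c] ['-', '_', '.'] then some c
  else if PySem.Chars.isIn [c] [' ', '/', '\\'] then some '-' else none

-- Source B's index run scan: the inner `while j < n and core[j] == core[i]` loop delimits the
-- run of core[i] (takeWhile/dropWhile), `core[i:j]` is c :: run, and `i = j` moves on.
def emitRuns : List Char → List Char
  | [] => []
  | c :: t =>
      (if c = '-' then ['-'] else c :: t.takeWhile (· == c)) ++ emitRuns (t.dropWhile (· == c))
termination_by l => l.length
decreasing_by
  simp only [List.length_cons]
  exact Nat.lt_succ_of_le (List.length_dropWhile_le _ _)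

def sanitize_repo_name_alt (name : String) : String :=
  let core := PySem.Chars.stripChars (name.toList.filterMap pvClassify) ['-', '.']
  let out := emitRuns core
  if out.isEmpty then "unnamed-project" else String.ofList out

-- ===== PRECONDITION & SPEC =====
def Spec_sanitize_repo_name (name : String) (out : String) : Prop := out = sanitize_repo_name_alt name
instance (name : String) (out : String) : Decidable (Spec_sanitize_repo_name name out) := by unfold Spec_sanitize_repo_name; infer_instance

-- ===== CLAIM (what is proved, stated in full; the proofs are below) =====
def Claim_equal_sanitize_repo_name : Prop := ∀ (name : String), Dom_sanitize_repo_name name → Spec_sanitize_repo_name name (sanitize_repo_name name)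

-- ===== LEMMAS AND PROOFS =====

-- A's building loop is B's filterMap over pvClassify
theorem foldl_build_eq (l : List Char) (acc : List Char) :
    l.foldl (fun acc c =>
      if PySem.Chars.isalnum c || PySem.Chars.isIn [c] ['-', '_', '.'] then acc ++ [c]
      else if PySem.Chars.isIn [c] [' ', '/', '\\'] then acc ++ ['-'] else acc) acc
    = acc ++ l.filterMap pvClassify := by
  induction l generalizing acc with
  | nil => simp
  | cons c t ih =>
      rw [List.foldl_cons, List.filterMap_cons]
      by_cases h1 : (PySem.Chars.isalnum c || PySem.Chars.isIn [c] ['-', '_', '.']) = true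
      · rw [show pvClassify c = some c by unfold pvClassify; rw [if_pos h1]]
        show List.foldl _ (if (PySem.Chars.isalnum c || PySem.Chars.isIn [c] ['-', '_', '.']) = true
              then acc ++ [c] else _) t = _
        rw [if_pos h1, ih]
        simp
      · by_cases h2 : PySem.Chars.isIn [c] [' ', '/', '\\'] = true
        · rw [show pvClassify c = some '-' by unfold pvClassify; rw [if_neg h1, if_pos h2]]
          show List.foldl _ (if (PySem.Chars.isalnum c || PySem.Chars.isIn [c] ['-', '_', '.']) = true
                then acc ++ [c] else if PySem.Chars.isIn [c] [' ', '/', '\\'] = true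
                then acc ++ ['-'] else acc) t = _
          rw [if_neg h1, if_pos h2, ih]
          simp
        · rw [show pvClassify c = none by unfold pvClassify; rw [if_neg h1, if_neg h2]]
          show List.foldl _ (if (PySem.Chars.isalnum c || PySem.Chars.isIn [c] ['-', '_', '.']) = true
                then acc ++ [c] else if PySem.Chars.isIn [c] [' ', '/', '\\'] = true
                then acc ++ ['-'] else acc) t = _
          rw [if_neg h1, if_neg h2, ih]

-- pvDed: collapse every hyphen run to one hyphen, as a right fold
def pvStep (c : Char) (acc : List Char) : List Char :=
  if c = '-' ∧ acc.head? = some '-' then acc else c :: acc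

def pvDed (l : List Char) : List Char := l.foldr pvStep []

theorem pvStep_head (c : Char) (acc : List Char) : (pvStep c acc).head? = some c := by
  unfold pvStep
  split_ifs with h
  · rw [h.2, h.1]
  · rfl

theorem pvStep_hyphen_idem (acc : List Char) : pvStep '-' (pvStep '-' acc) = pvStep '-' acc := by
  conv_lhs => rw [pvStep]
  rw [if_pos ⟨rfl, pvStep_head '-' acc⟩]

theorem pvDed_head (l : List Char) : (pvDed l).head? = l.head? := by
  cases l with
  | nil => rfl
  | cons c t => simpa [pvDed] using pvStep_head c (pvDed t)

theorem pvDed_rep (l : List Char) : pvDed (pvRep l) = pvDed l := by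
  induction l using pvRep.induct with
  | case1 => simp [pvRep]
  | case2 c => simp [pvRep]
  | case3 a b t h ih =>
      obtain ⟨rfl, rfl⟩ := h
      simp only [pvRep]
      show pvStep '-' (pvDed (pvRep t)) = pvStep '-' (pvStep '-' (pvDed t))
      rw [ih, pvStep_hyphen_idem]
  | case4 a b t h ih =>
      simp only [pvRep, if_neg h]
      show pvStep a (pvDed (pvRep (b :: t))) = pvStep a (pvDed (b :: t))
      rw [ih]

theorem pvDed_no_dd (l : List Char) (h : ¬ ['-', '-'] <:+: l) : pvDed l = l := by
  induction l with
  | nil => rfl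
  | cons c t ih =>
      have ht : ¬ ['-', '-'] <:+: t := fun h2 => h (h2.trans (List.suffix_cons c t).isInfix)
      show pvStep c (pvDed t) = c :: t
      rw [ih ht]
      unfold pvStep
      rw [if_neg]
      rintro ⟨rfl, hh⟩
      cases t with
      | nil => simp at hh
      | cons b t2 =>
        simp only [List.head?_cons, Option.some.injEq] at hh
        subst hh
        exact h ⟨[], t2, by simp⟩

theorem pvDed_cons_ne (c : Char) (hc : ¬ c = '-') (u : List Char) :
    pvDed (c :: u) = c :: pvDed u := by
  show pvStep c (pvDed u) = _
  unfold pvStep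
  rw [if_neg (fun h => hc h.1)]

theorem pvDed_run_ne (c : Char) (hc : ¬ c = '-') (r u : List Char)
    (hr : ∀ x ∈ r, x = c) : pvDed (r ++ u) = r ++ pvDed u := by
  induction r with
  | nil => rfl
  | cons x r' ih =>
      have hx : x = c := hr x (by simp)
      subst hx
      rw [List.cons_append, pvDed_cons_ne x hc, ih (fun y hy => hr y (by simp [hy]))]
      rfl

theorem pvDed_hyphen_run (r u : List Char) (hr : ∀ x ∈ r, x = '-') :
    pvDed ('-' :: (r ++ u)) = pvStep '-' (pvDed u) := by
  induction r with
  | nil => rfl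
  | cons x r' ih =>
      have hx : x = '-' := hr x (by simp)
      subst hx
      show pvStep '-' (pvDed ('-' :: (r' ++ u))) = _
      rw [ih (fun y hy => hr y (by simp [hy])), pvStep_hyphen_idem]

theorem pvDropWhile_head (p : Char → Bool) (l : List Char) (y : Char) (u : List Char)
    (h : l.dropWhile p = y :: u) : p y = false := by
  induction l with
  | nil => simp at h
  | cons a t ih =>
      rw [List.dropWhile_cons] at h
      by_cases ha : p a = true
      · exact ih (by rwa [if_pos ha] at h)
      · rw [if_neg ha] at h
        cases h
        simpa using ha

theorem emitRuns_eq_pvDed (l : List Char) : emitRuns l = pvDed l := by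
  induction l using emitRuns.induct with
  | case1 => simp [emitRuns]; rfl
  | case2 c t ih =>
      by_cases hc : c = '-'
      · subst hc
        rw [emitRuns, if_pos rfl, ih]
        have hrun : ∀ x ∈ t.takeWhile (· == '-'), x = '-' := by
          intro x hx
          simpa using List.mem_takeWhile_imp hx
        have h1 : pvDed ('-' :: t) = pvStep '-' (pvDed (t.dropWhile (· == '-'))) := by
          conv_lhs => rw [show t = t.takeWhile (· == '-') ++ t.dropWhile (· == '-')
            from List.takeWhile_append_dropWhile.symm]
          exact pvDed_hyphen_run _ _ hrun
        rw [h1]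
        unfold pvStep
        rw [if_neg]
        · rfl
        rintro ⟨-, hh⟩
        rw [pvDed_head] at hh
        cases hd : t.dropWhile (· == '-') with
        | nil => rw [hd] at hh; simp at hh
        | cons y u =>
          rw [hd] at hh
          simp only [List.head?_cons, Option.some.injEq] at hh
          have := pvDropWhile_head _ _ _ _ hd
          rw [hh] at this
          simp at this
      · rw [emitRuns, if_neg hc, ih]
        have hrun : ∀ x ∈ t.takeWhile (· == c), x = c := by
          intro x hx
          simpa using List.mem_takeWhile_imp hx
        conv_rhs => rw [show t = t.takeWhile (· == c) ++ t.dropWhile (· == c)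
          from List.takeWhile_append_dropWhile.symm]
        rw [pvDed_cons_ne c hc, pvDed_run_ne c hc _ _ hrun]
        simp

theorem collapseLoop_eq_pvDed (l : List Char) : collapseLoop l = pvDed l := by
  induction l using collapseLoop.induct with
  | case1 s h ih =>
      rw [collapseLoop, dif_pos h, ih, pvReplace_eq_pvRep, pvDed_rep]
  | case2 s h =>
      rw [collapseLoop, dif_neg h, pvDed_no_dd]
      exact (PySem.Chars.isIn_eq_false_iff _ _).mp (by simpa using h)

-- ===== VERDICT (by name: the statement is the Claim_ definition above) =====
theorem sanitize_repo_name_spec : Claim_equal_sanitize_repo_name := by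
  intro name _
  unfold Spec_sanitize_repo_name
  simp only [sanitize_repo_name, sanitize_repo_name_alt, foldl_build_eq,
    collapseLoop_eq_pvDed, emitRuns_eq_pvDed, List.nil_append]
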